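-- pv_equiv track=rewrite | github.com/ShibilAhamed701212/clockwork | clockwork/context/ide_context_generator.py | _extract_protected_files
-- ===== SOURCE A (Python) =====
-- def _extract_protected_files(rules_text: str) -> list[str]:
--     protected = []
--     capture = False
--     for line in rules_text.splitlines():
--         if "protect" in line.lower() or "do not" in line.lower():
--             capture = True
--         if capture and line.strip().startswith("- "):
--             item = line.strip()[2:].strip()
--             if item and len(item) < 80:
--                 protected.append(item)
--         elif capture and line.strip() == "":
--             capture = False
--     return protected or [".clockwork/context.yaml", ".clockwork/rules.md"]
-- ===== SOURCE B (Python) =====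
-- def _extract_protected_files(rules_text: str) -> list[str]:
--     # Partition the lines into maximal runs of non-blank lines, then scan
--     # each block with a local capture flag (blank lines reset capture in A,
--     # so capture never crosses a block boundary).
--     blocks = []
--     current = []
--     for line in rules_text.splitlines():
--         if line.strip() == "":
--             blocks.append(current)
--             current = []
--         else:
--             current.append(line)
--     blocks.append(current)
--
--     protected = []
--     for block in blocks:
--         capture = False
--         for line in block:
--             low = line.lower()
--             if "protect" in low or "do not" in low:
--                 capture = True
--             if capture:
--                 stripped = line.strip()
--                 if stripped.startswith("- "):
--                     item = stripped[2:].strip()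
--                     if item and len(item) < 80:
--                         protected.append(item)
--     return protected or [".clockwork/context.yaml", ".clockwork/rules.md"]
-- ===== Notes on version B (the rewrite author's own statement) =====
-- stated objective: alternative
-- what changed: A's single scan with a persistent capture flag is re-decomposed into first partitioning the lines into blank-line-separated blocks and then scanning each block with a local capture flag (capture never survives a blank line in A, so the block decomposition is exact).
import Mathlib
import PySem

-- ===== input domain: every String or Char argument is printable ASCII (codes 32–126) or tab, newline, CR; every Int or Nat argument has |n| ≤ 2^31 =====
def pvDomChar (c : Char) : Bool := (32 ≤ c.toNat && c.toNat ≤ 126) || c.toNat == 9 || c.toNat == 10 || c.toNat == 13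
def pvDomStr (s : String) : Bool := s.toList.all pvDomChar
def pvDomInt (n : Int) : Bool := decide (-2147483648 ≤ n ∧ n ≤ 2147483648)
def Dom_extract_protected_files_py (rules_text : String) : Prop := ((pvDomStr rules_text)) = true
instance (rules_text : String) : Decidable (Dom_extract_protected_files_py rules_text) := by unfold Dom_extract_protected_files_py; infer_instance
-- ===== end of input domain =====

-- B re-decomposes A's single stateful scan into blank-line block splitting plus a
-- per-block local scan (objective: alternative decomposition, same cost); return values are equal.

-- shared named subconditions of both programs
-- "protect" in line.lower() or "do not" in line.lower()
def pvTrig (line : String) : Bool :=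
  PySem.Str.isIn "protect" (PySem.Str.lower line) || PySem.Str.isIn "do not" (PySem.Str.lower line)

-- line.strip() == ""
def pvBlank (line : String) : Bool := PySem.Str.strip line == ""

-- ===== PORT A =====
-- one pass over splitlines with state (protected, capture), exactly A's loop body
def pvAStep (st : List String × Bool) (line : String) : List String × Bool :=
  let capture := if pvTrig line then true else st.2
  if capture && PySem.Str.startswith (PySem.Str.strip line) "- " then
    let item := PySem.Str.strip (PySem.Str.slice (PySem.Str.strip line) (some 2) none)
    if item != "" && decide (PySem.Str.len item < 80) then (st.1 ++ [item], capture)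
    else (st.1, capture)
  else if capture && pvBlank line then (st.1, false)
  else (st.1, capture)

def extract_protected_files_py (rules_text : String) : List String :=
  let prot := ((PySem.Str.splitlines rules_text).foldl pvAStep ([], false)).1
  if prot = [] then [".clockwork/context.yaml", ".clockwork/rules.md"] else prot

-- ===== PORT B =====
-- first loop of Source B: partition the lines into blocks at blank lines
def pvBSplit (st : List (List String) × List String) (line : String) :
    List (List String) × List String :=
  if pvBlank line then (st.1 ++ [st.2], []) else (st.1, st.2 ++ [line])

-- inner loop of Source B: scan one block's line with a local capture flag
def pvBInner (st : List String × Bool) (line : String) : List String × Bool :=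
  let capture := if pvTrig line then true else st.2
  if capture then
    let stripped := PySem.Str.strip line
    if PySem.Str.startswith stripped "- " then
      let item := PySem.Str.strip (PySem.Str.slice stripped (some 2) none)
      if item != "" && decide (PySem.Str.len item < 80) then (st.1 ++ [item], capture)
      else (st.1, capture)
    else (st.1, capture)
  else (st.1, capture)

-- outer loop of Source B over the blocks (capture restarts at false in each block)
def pvBBlock (acc : List String) (block : List String) : List String :=
  (block.foldl pvBInner (acc, false)).1

def extract_protected_files_py_alt (rules_text : String) : List String :=
  let p := (PySem.Str.splitlines rules_text).foldl pvBSplit ([], [])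
  let blocks := p.1 ++ [p.2]
  let prot := blocks.foldl pvBBlock []
  if prot = [] then [".clockwork/context.yaml", ".clockwork/rules.md"] else prot

-- ===== PRECONDITION & SPEC =====
def Spec_extract_protected_files_py (rules_text : String) (out : List String) : Prop := out = extract_protected_files_py_alt rules_text
instance (rules_text : String) (out : List String) : Decidable (Spec_extract_protected_files_py rules_text out) := by unfold Spec_extract_protected_files_py; infer_instance

-- ===== CLAIM (what is proved, stated in full; the proofs are below) =====
def Claim_equal_extract_protected_files_py : Prop := ∀ (rules_text : String), Dom_extract_protected_files_py rules_text → Spec_extract_protected_files_py rules_text (extract_protected_files_py rules_text)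

-- ===== LEMMAS AND PROOFS =====

-- the item a line contributes once capture holds and the line starts with "- "
def pvItem (line : String) : List String :=
  let item := PySem.Str.strip (PySem.Str.slice (PySem.Str.strip line) (some 2) none)
  if item != "" && decide (PySem.Str.len item < 80) then [item] else []

-- what one line appends, given capture state c before the trigger update
def pvD (line : String) (c : Bool) : List String :=
  if (pvTrig line || c) && PySem.Str.startswith (PySem.Str.strip line) "- " then pvItem line else []

-- A's capture state after one line
def pvE (line : String) (c : Bool) : Bool :=
  let c' := pvTrig line || c
  if c' && PySem.Str.startswith (PySem.Str.strip line) "- " then c'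
  else if c' && pvBlank line then false
  else c'

-- reference spec: what A's loop appends from 'lines' starting in capture state c
def pvG : List String → Bool → List String
  | [], _ => []
  | l :: ls, c => pvD l c ++ pvG ls (pvE l c)

lemma pvAStep_eq (st : List String × Bool) (l : String) :
    pvAStep st l = (st.1 ++ pvD l st.2, pvE l st.2) := by
  obtain ⟨acc, c⟩ := st
  simp only [pvAStep, pvD, pvE, pvItem, Bool.if_true_left]
  generalize pvTrig l = t
  generalize PySem.Str.startswith (PySem.Str.strip l) "- " = sw
  generalize pvBlank l = bl
  generalize PySem.Str.strip (PySem.Str.slice (PySem.Str.strip l) (some 2) none) = it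
  cases t <;> cases c <;> cases sw <;> cases bl <;> simp <;> split_ifs <;> simp

lemma pvA_foldl (lines : List String) :
    ∀ (acc : List String) (c : Bool),
      (lines.foldl pvAStep (acc, c)).1 = acc ++ pvG lines c := by
  induction lines with
  | nil => simp [pvG]
  | cons l ls ih =>
    intro acc c
    simp only [List.foldl_cons, pvAStep_eq, pvG, ih, List.append_assoc]

lemma pvBInner_eq (st : List String × Bool) (l : String) :
    pvBInner st l = (st.1 ++ pvD l st.2, pvTrig l || st.2) := by
  obtain ⟨acc, c⟩ := st
  simp only [pvBInner, pvD, pvItem, Bool.if_true_left]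
  generalize pvTrig l = t
  generalize PySem.Str.startswith (PySem.Str.strip l) "- " = sw
  generalize PySem.Str.strip (PySem.Str.slice (PySem.Str.strip l) (some 2) none) = it
  cases t <;> cases c <;> cases sw <;> simp <;> split_ifs <;> simp

lemma pvE_nonblank (l : String) (c : Bool) (h : pvBlank l = false) :
    pvE l c = (pvTrig l || c) := by
  simp only [pvE, h]
  generalize pvTrig l = t
  generalize PySem.Str.startswith (PySem.Str.strip l) "- " = sw
  cases t <;> cases c <;> cases sw <;> simp

lemma pvBlank_no_item (l : String) (h : pvBlank l = true) :
    PySem.Str.startswith (PySem.Str.strip l) "- " = false := by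
  simp only [pvBlank, beq_iff_eq] at h
  rw [h]; decide

lemma pvG_blank (l : String) (ls : List String) (c : Bool) (h : pvBlank l = true) :
    pvG (l :: ls) c = pvG ls false := by
  have hi := pvBlank_no_item l h
  simp only [pvG, pvD, pvE, hi, h]
  generalize pvTrig l = t
  cases t <;> cases c <;> simp

-- recursive form of B's block splitting
def pvSplitB : List String → List String → List (List String)
  | cur, [] => [cur]
  | cur, l :: ls => if pvBlank l then cur :: pvSplitB [] ls else pvSplitB (cur ++ [l]) ls

lemma pvBSplit_foldl (lines : List String) :
    ∀ (blocks : List (List String)) (cur : List String),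
      (lines.foldl pvBSplit (blocks, cur)).1 ++ [(lines.foldl pvBSplit (blocks, cur)).2]
        = blocks ++ pvSplitB cur lines := by
  induction lines with
  | nil => simp [pvSplitB]
  | cons l ls ih =>
    intro blocks cur
    by_cases h : pvBlank l = true
    · simp only [List.foldl_cons, pvBSplit, pvSplitB, h, if_true, ih, List.append_assoc,
        List.singleton_append]
    · simp only [Bool.not_eq_true] at h
      simp only [List.foldl_cons, pvBSplit, pvSplitB, h, Bool.false_eq_true, if_false, ih]

lemma pvBInner_acc (ls : List String) :
    ∀ (acc : List String) (c : Bool),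
      ls.foldl pvBInner (acc, c)
        = (acc ++ (ls.foldl pvBInner ([], c)).1, (ls.foldl pvBInner ([], c)).2) := by
  induction ls with
  | nil => simp
  | cons l ls ih =>
    intro acc c
    simp only [List.foldl_cons, pvBInner_eq, List.nil_append]
    rw [ih, ih (pvD l c) (pvTrig l || c)]
    simp [List.append_assoc]

lemma pvBBlock_foldl (bs : List (List String)) :
    ∀ (acc : List String),
      bs.foldl pvBBlock acc
        = acc ++ (bs.map (fun b => (b.foldl pvBInner ([], false)).1)).flatten := by
  induction bs with
  | nil => simp
  | cons b bs ih =>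
    intro acc
    simp only [List.foldl_cons, List.map_cons, List.flatten_cons, pvBBlock]
    rw [pvBInner_acc, ih, List.append_assoc]

lemma pvSplitB_spec (lines : List String) :
    ∀ (cur : List String),
      ((pvSplitB cur lines).map (fun b => (b.foldl pvBInner ([], false)).1)).flatten
        = (cur.foldl pvBInner ([], false)).1 ++ pvG lines (cur.foldl pvBInner ([], false)).2 := by
  induction lines with
  | nil => simp [pvSplitB, pvG]
  | cons l ls ih =>
    intro cur
    by_cases h : pvBlank l = true
    · rw [pvG_blank l ls _ h]
      simp only [pvSplitB, h, if_true, List.map_cons, List.flatten_cons, ih, List.foldl_nil,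
        List.nil_append]
    · simp only [Bool.not_eq_true] at h
      simp only [pvSplitB, h, Bool.false_eq_true, if_false]
      rw [ih (cur ++ [l]), List.foldl_append]
      simp only [List.foldl_cons, List.foldl_nil, pvBInner_eq, pvG, List.append_assoc]
      rw [pvE_nonblank l _ h]

lemma pvMain (lines : List String) :
    ((lines.foldl pvBSplit ([], [])).1 ++ [(lines.foldl pvBSplit ([], [])).2]).foldl pvBBlock []
      = (lines.foldl pvAStep ([], false)).1 := by
  rw [pvBBlock_foldl, pvBSplit_foldl, pvA_foldl]
  simpa using pvSplitB_spec lines []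

-- ===== VERDICT (by name: the statement is the Claim_ definition above) =====
theorem extract_protected_files_py_spec : Claim_equal_extract_protected_files_py := by
  intro rules_text _
  unfold Spec_extract_protected_files_py
  simp only [extract_protected_files_py, extract_protected_files_py_alt, pvMain]
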